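-- pv_equiv track=rewrite | github.com/greencar77/labssol | python/aoc/2025/day02/main.py | invalidityPart2
-- ===== SOURCE A (Python) =====
-- def invalidityPart2(n):
--     s = str(n)
--     maxPortionLength = len(s) // 2
--     for l in range(1, maxPortionLength + 1):
--         portion = s[0:l]
--         r = s.replace(portion, '')
--         if len(r) == 0:
--             return int(s)
--     return 0
-- ===== SOURCE B (Python) =====
-- def invalidityPart2(n):
--     s = str(n)
--     return int(s) if s in (s + s)[1:-1] else 0
-- ===== Notes on version B (the rewrite author's own statement) =====
-- stated objective: idiomatic
-- what changed: Replaced the loop over prefix lengths with str.replace by the classic string-doubling repetition test: s is a repetition of a shorter block iff s occurs in (s+s)[1:-1].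
import Mathlib
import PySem

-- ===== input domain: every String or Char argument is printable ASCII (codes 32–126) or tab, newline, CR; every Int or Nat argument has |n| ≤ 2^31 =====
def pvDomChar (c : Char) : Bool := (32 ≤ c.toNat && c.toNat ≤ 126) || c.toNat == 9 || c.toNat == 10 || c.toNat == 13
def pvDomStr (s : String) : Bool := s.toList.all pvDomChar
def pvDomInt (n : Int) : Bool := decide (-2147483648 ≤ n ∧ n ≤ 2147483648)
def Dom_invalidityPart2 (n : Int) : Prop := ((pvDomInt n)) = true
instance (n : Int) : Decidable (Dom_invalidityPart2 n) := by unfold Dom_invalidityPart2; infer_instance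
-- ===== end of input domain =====

-- B replaces A's prefix-scan-and-replace loop by the string-doubling repetition test
-- 's in (s+s)[1:-1]' (idiomatic; same exact return value for every int n).

-- ===== PORT A =====
-- the 'for l in range(1, maxPortionLength + 1)' loop with its early return
def invalidityPart2Loop (s : List Char) : List Int → Int
  | [] => 0
  | l :: rest =>
    let portion := PySem.Chars.slice s (some 0) (some l)
    let r := PySem.Chars.replace s portion []
    if PySem.Chars.len r = 0 then (PySem.Int.ofChars? s).getD 0
    else invalidityPart2Loop s rest

def invalidityPart2 (n : Int) : Int :=
  let s := PySem.Int.toChars n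
  let maxPortionLength := PySem.Int.floordiv (PySem.Chars.len s) 2
  -- int(s) with s = str(n) never raises, so ofChars? is always 'some'; .getD 0 is an unreachable default
  invalidityPart2Loop s (PySem.List.pyRange 1 (maxPortionLength + 1) 1)

-- ===== PORT B =====
def invalidityPart2_alt (n : Int) : Int :=
  let s := PySem.Int.toChars n
  if PySem.Chars.isIn s (PySem.Chars.slice (s ++ s) (some 1) (some (-1))) then
    (PySem.Int.ofChars? s).getD 0    -- int(s), never raises for s = str(n)
  else 0

-- ===== PRECONDITION & SPEC =====
def Spec_invalidityPart2 (n : Int) (out : Int) : Prop := out = invalidityPart2_alt n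
instance (n : Int) (out : Int) : Decidable (Spec_invalidityPart2 n out) := by unfold Spec_invalidityPart2; infer_instance

-- ===== CLAIM (what is proved, stated in full; the proofs are below) =====
def Claim_equal_invalidityPart2 : Prop := ∀ (n : Int), Dom_invalidityPart2 n → Spec_invalidityPart2 n (invalidityPart2 n)

-- ===== LEMMAS AND PROOFS =====

-- w repeated k times
def repChars (w : List Char) : Nat → List Char
  | 0 => []
  | k + 1 => w ++ repChars w k

theorem repChars_nil (k : Nat) : repChars [] k = [] := by
  induction k with
  | zero => rfl
  | succ k ih => simp [repChars, ih]

theorem length_repChars (w : List Char) (k : Nat) : (repChars w k).length = k * w.length := by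
  induction k with
  | zero => simp [repChars]
  | succ k ih => simp [repChars, ih]; ring

theorem repChars_append (w : List Char) (k : Nat) : repChars w k ++ w = w ++ repChars w k := by
  induction k with
  | zero => simp [repChars]
  | succ k ih =>
    simp only [repChars]
    rw [List.append_assoc, ih]

-- unfolding equations for PySem.Chars.replace.go (new = [])
theorem go_zero (old : List Char) (l acc : List Char) :
    PySem.Chars.replace.go old [] 0 l acc = acc.reverse ++ l := by
  rw [PySem.Chars.replace.go]

theorem go_succ_nil (old : List Char) (f : Nat) (acc : List Char) :
    PySem.Chars.replace.go old [] (f + 1) [] acc = acc.reverse := by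
  rw [PySem.Chars.replace.go]
  simp

theorem go_succ_cons (old : List Char) (f : Nat) (c : Char) (t acc : List Char) :
    PySem.Chars.replace.go old [] (f + 1) (c :: t) acc =
      if old.isPrefixOf (c :: t) then
        PySem.Chars.replace.go old [] f ((c :: t).drop old.length) acc
      else PySem.Chars.replace.go old [] f t (c :: acc) := by
  rw [PySem.Chars.replace.go]
  simp

theorem go_acc_ne_nil (old : List Char) :
    ∀ (fuel : Nat) (l acc : List Char), acc ≠ [] → PySem.Chars.replace.go old [] fuel l acc ≠ [] := by
  intro fuel
  induction fuel with
  | zero =>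
    intro l acc h
    rw [go_zero]
    simp [h]
  | succ f ih =>
    intro l acc h
    cases l with
    | nil => rw [go_succ_nil]; simp [h]
    | cons c t =>
      rw [go_succ_cons]
      split
      · exact ih _ acc h
      · exact ih _ (c :: acc) (by simp)

theorem go_nil_iff (old : List Char) (hold : old ≠ []) :
    ∀ (fuel : Nat) (l : List Char), l.length ≤ fuel →
      (PySem.Chars.replace.go old [] fuel l [] = [] ↔ ∃ k, l = repChars old k) := by
  intro fuel
  induction fuel with
  | zero =>
    intro l hl
    have : l = [] := List.eq_nil_of_length_eq_zero (by omega)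
    subst this
    rw [go_zero]
    simp
    exact ⟨0, rfl⟩
  | succ f ih =>
    intro l hl
    cases l with
    | nil =>
      rw [go_succ_nil]
      simp
      exact ⟨0, rfl⟩
    | cons c t =>
      rw [go_succ_cons]
      by_cases hpre : old.isPrefixOf (c :: t) = true
      · rw [if_pos hpre]
        have hp : old <+: (c :: t) := List.isPrefixOf_iff_prefix.mp hpre
        have holdlen : 1 ≤ old.length := by
          cases old with
          | nil => exact absurd rfl hold
          | cons _ _ => simp
        have hlen' : ((c :: t).drop old.length).length ≤ f := by
          rw [List.length_drop]
          simp only [List.length_cons] at hl ⊢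
          omega
        rw [ih _ hlen']
        constructor
        · rintro ⟨k, hk⟩
          refine ⟨k + 1, ?_⟩
          have : (c :: t) = old ++ (c :: t).drop old.length := by
            conv_lhs => rw [← List.take_append_drop old.length (c :: t)]
            congr 1
            exact (List.prefix_iff_eq_take.mp hp).symm
          rw [this, hk]
          rfl
        · rintro ⟨k, hk⟩
          cases k with
          | zero => simp [repChars] at hk
          | succ k =>
            refine ⟨k, ?_⟩
            simp only [repChars] at hk
            rw [hk, List.drop_left]
      · rw [if_neg hpre]
        constructor
        · intro hgo
          exact absurd hgo (go_acc_ne_nil old f t [c] (by simp))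
        · rintro ⟨k, hk⟩
          cases k with
          | zero => simp [repChars] at hk
          | succ k =>
            exfalso
            apply hpre
            apply List.isPrefixOf_iff_prefix.mpr
            rw [hk]
            simp only [repChars]
            exact List.prefix_append old _

theorem replace_nil_iff (s old : List Char) (hold : old ≠ []) :
    (PySem.Chars.replace s old [] = [] ↔ ∃ k, s = repChars old k) := by
  unfold PySem.Chars.replace
  rw [if_neg (by simp [hold])]
  exact go_nil_iff old hold s.length s le_rfl

-- rotation machinery
theorem rot_mul (l : List Char) (a : Nat) (h : l.rotate a = l) (k : Nat) : l.rotate (a * k) = l := by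
  induction k with
  | zero => simp
  | succ k ih => rw [Nat.mul_succ, ← List.rotate_rotate, ih, h]

theorem rot_mod (l : List Char) (a b : Nat) (ha : l.rotate a = l) (hb : l.rotate b = l) :
    l.rotate (b % a) = l := by
  have h1 : l.rotate (a * (b / a) + b % a) = l := by
    rw [Nat.div_add_mod]
    exact hb
  have h2 : l.rotate (a * (b / a) + b % a) = l.rotate (b % a) := by
    rw [← List.rotate_rotate, rot_mul l a ha (b / a)]
  rw [← h2]
  exact h1

theorem rot_gcd (l : List Char) : ∀ (a b : Nat), l.rotate a = l → l.rotate b = l →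
    l.rotate (Nat.gcd a b) = l := by
  intro a
  induction a using Nat.strong_induction_on with
  | _ a ih =>
    intro b ha hb
    rcases Nat.eq_zero_or_pos a with h0 | h0
    · subst h0; simpa using hb
    · rw [Nat.gcd_rec a b]
      exact ih (b % a) (Nat.mod_lt b h0) a (rot_mod l a b ha hb) ha

-- a list of length g*k fixed by rotation by g is a tiling by its g-prefix
theorem rot_tiling (g : Nat) : ∀ (k : Nat) (l : List Char), l.length = g * k →
    l.rotate g = l → l = repChars (l.take g) k := by
  intro k
  induction k with
  | zero =>
    intro l hlen _
    have : l = [] := List.eq_nil_of_length_eq_zero (by omega)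
    simp [this, repChars]
  | succ k ih =>
    intro l hlen hrot
    rcases Nat.eq_zero_or_pos g with hg0 | hg0
    · subst hg0
      have h0 : l.length = 0 := by simpa using hlen
      have : l = [] := List.eq_nil_of_length_eq_zero h0
      simp [this, repChars_nil]
    · have hgle : g ≤ l.length := by
        rw [hlen]; exact Nat.le_mul_of_pos_right g (by omega)
      have heq : l.drop g ++ l.take g = l.take g ++ l.drop g := by
        rw [← List.rotate_eq_drop_append_take hgle, hrot]
        exact (List.take_append_drop g l).symm
      have htlen : (l.take g).length = g := by
        rw [List.length_take]; omega
      have hdlen : (l.drop g).length = g * k := by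
        have hx : g * (k + 1) = g * k + g := by ring
        rw [List.length_drop, hlen, hx]
        omega
      rcases Nat.eq_zero_or_pos k with hk0 | hk0
      · subst hk0
        have hd : l.drop g = [] := List.eq_nil_of_length_eq_zero (by simpa using hdlen)
        conv_lhs => rw [← List.take_append_drop g l, hd]
        simp [repChars]
      · have hgd : g ≤ (l.drop g).length := by
          rw [hdlen]; exact Nat.le_mul_of_pos_right g hk0
        have h1 : (l.drop g ++ l.take g).take g = (l.drop g).take g := by
          rw [List.take_append, show g - (l.drop g).length = 0 from by omega]
          simp
        have h2 : (l.take g ++ l.drop g).take g = l.take g := by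
          rw [List.take_append, show g - (l.take g).length = 0 from by omega]
          simp [List.take_take]
        have htake : (l.drop g).take g = l.take g := by rw [← h1, heq, h2]
        have h3 : (l.drop g ++ l.take g).drop g = (l.drop g).drop g ++ l.take g := by
          rw [List.drop_append, show g - (l.drop g).length = 0 from by omega]
          simp
        have h4 : (l.take g ++ l.drop g).drop g = l.drop g := by
          rw [List.drop_append, show g - (l.take g).length = 0 from by omega]
          simp [List.drop_eq_nil_of_le (le_of_eq htlen)]
        have hdrop : (l.drop g).drop g ++ l.take g = l.drop g := by rw [← h3, heq, h4]
        have hrotd : (l.drop g).rotate g = l.drop g := by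
          rw [List.rotate_eq_drop_append_take hgd, htake, hdrop]
        have ihd := ih (l.drop g) hdlen hrotd
        rw [htake] at ihd
        calc l = l.take g ++ l.drop g := (List.take_append_drop g l).symm
          _ = l.take g ++ repChars (l.take g) k := by rw [← ihd]
          _ = repChars (l.take g) (k + 1) := rfl

-- a tiling is fixed by rotation by the block length
theorem tiling_rot (w : List Char) (k : Nat) : (repChars w k).rotate w.length = repChars w k := by
  cases k with
  | zero => simp [repChars]
  | succ k =>
    have hle : w.length ≤ (repChars w (k + 1)).length := by
      rw [length_repChars]; exact Nat.le_mul_of_pos_left w.length (by omega)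
    rw [List.rotate_eq_drop_append_take hle]
    simp only [repChars]
    rw [List.drop_left, List.take_left, repChars_append]

-- geometry of the slice (s+s)[1:-1]
theorem slice_doubled (cs : List Char) (h : cs ≠ []) :
    PySem.Chars.slice (cs ++ cs) (some 1) (some (-1)) = cs.tail ++ cs.dropLast := by
  have hL : 1 ≤ cs.length := List.length_pos_of_ne_nil h
  have ha : PySem.List.clampIdx (cs ++ cs).length 1 = 1 := by
    unfold PySem.List.clampIdx
    rw [if_neg (by norm_num)]
    simp only [List.length_append, Int.toNat_one]
    omega
  have hb : PySem.List.clampIdx (cs ++ cs).length (-1) = (cs ++ cs).length - 1 :=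
    PySem.List.clampIdx_neg_one (cs ++ cs).length
  simp only [PySem.Chars.slice_eq_listSlice, PySem.List.slice, ha, hb]
  obtain ⟨c, t, rfl⟩ : ∃ c t, cs = c :: t := by
    cases cs with
    | nil => exact absurd rfl h
    | cons c t => exact ⟨c, t, rfl⟩
  simp only [List.length_append, List.length_cons, List.cons_append, List.drop_succ_cons,
    List.drop_zero, List.tail_cons]
  rw [List.take_append, List.take_of_length_le (by omega), List.dropLast_eq_take]
  have hidx : t.length + (t.length + 1) + 1 - 1 - 1 - t.length = (c :: t).length - 1 := by
    simp only [List.length_cons]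
    omega
  rw [hidx]

-- (cs.tail ++ cs.dropLast).drop j for j small
theorem drop_tail_append (cs : List Char) (j : Nat) (hj : j + 2 ≤ cs.length) :
    (cs.tail ++ cs.dropLast).drop j = cs.drop (j + 1) ++ cs.dropLast := by
  rw [List.drop_append]
  have h1 : j - cs.tail.length = 0 := by
    rw [List.length_tail]; omega
  rw [h1]
  simp only [List.drop_zero]
  congr 1
  cases cs with
  | nil => simp at hj
  | cons c t => simp

theorem take_drop_append (cs : List Char) (p : Nat) (hp1 : 1 ≤ p) (hp : p ≤ cs.length - 1) :
    (cs.drop p ++ cs.dropLast).take cs.length = cs.drop p ++ cs.take p := by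
  rw [List.take_append]
  have h1 : (cs.drop p).take cs.length = cs.drop p :=
    List.take_of_length_le (by rw [List.length_drop]; omega)
  rw [h1, List.length_drop]
  congr 1
  rw [List.dropLast_eq_take, List.take_take]
  congr 1
  omega

-- B's membership test holds iff cs has a nontrivial rotation fixed point
theorem isIn_iff_rot (cs : List Char) (h : cs ≠ []) :
    PySem.Chars.isIn cs (PySem.Chars.slice (cs ++ cs) (some 1) (some (-1))) = true ↔
      ∃ p : Nat, 1 ≤ p ∧ p ≤ cs.length - 1 ∧ cs.rotate p = cs := by
  have hL : 1 ≤ cs.length := List.length_pos_of_ne_nil h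
  rw [slice_doubled cs h, ← PySem.Chars.exists_prefix_drop_iff_isIn]
  constructor
  · rintro ⟨j, hpre⟩
    have hlen := hpre.length_le
    rw [List.length_drop, List.length_append, List.length_tail, List.length_dropLast] at hlen
    have hj2 : j + 2 ≤ cs.length := by omega
    rw [drop_tail_append cs j hj2] at hpre
    set p := j + 1 with hp
    have hp1 : 1 ≤ p := by omega
    have hple : p ≤ cs.length - 1 := by omega
    have hcseq : cs = cs.drop p ++ cs.take p := by
      have htk := List.prefix_iff_eq_take.mp hpre
      rw [take_drop_append cs p hp1 hple] at htk
      exact htk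
    refine ⟨p, hp1, hple, ?_⟩
    rw [List.rotate_eq_drop_append_take (by omega : p ≤ cs.length), ← hcseq]
  · rintro ⟨p, hp1, hp2, hrot⟩
    have hL2 : 2 ≤ cs.length := by omega
    refine ⟨p - 1, ?_⟩
    have hj2 : (p - 1) + 2 ≤ cs.length := by omega
    rw [drop_tail_append cs (p - 1) hj2]
    have hpp : p - 1 + 1 = p := by omega
    rw [hpp]
    have hcseq : cs = cs.drop p ++ cs.take p := by
      rw [← List.rotate_eq_drop_append_take (by omega : p ≤ cs.length), hrot]
    have htp : cs.take p <+: cs.dropLast := by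
      rw [List.dropLast_eq_take]
      have : cs.take p = (cs.take (cs.length - 1)).take p := by
        rw [List.take_take]
        congr 1
        omega
      rw [this]
      exact List.take_prefix _ _
    have hfin := (List.prefix_append_right_inj (cs.drop p)).mpr htp
    rw [← hcseq] at hfin
    exact hfin

-- A's loop returns the hit value iff some l in the list fires
theorem loop_eq (s : List Char) (lr : List Int) :
    invalidityPart2Loop s lr =
      if ∃ l ∈ lr, PySem.Chars.replace s (PySem.Chars.slice s (some 0) (some l)) [] = [] then
        (PySem.Int.ofChars? s).getD 0
      else 0 := by
  induction lr with
  | nil => simp [invalidityPart2Loop]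
  | cons l rest ih =>
    simp only [invalidityPart2Loop]
    rw [ih]
    by_cases hc : PySem.Chars.replace s (PySem.Chars.slice s (some 0) (some l)) [] = []
    · have hlen : PySem.Chars.len (PySem.Chars.replace s (PySem.Chars.slice s (some 0) (some l)) []) = 0 := by
        rw [hc]; rfl
      rw [if_pos hlen, if_pos ⟨l, List.mem_cons_self, hc⟩]
    · have hlen : ¬ PySem.Chars.len (PySem.Chars.replace s (PySem.Chars.slice s (some 0) (some l)) []) = 0 := by
        rw [PySem.Chars.len_eq]
        intro hx
        exact hc (List.eq_nil_of_length_eq_zero (by exact_mod_cast hx))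
      rw [if_neg hlen]
      have hiff : (∃ x ∈ rest, PySem.Chars.replace s (PySem.Chars.slice s (some 0) (some x)) [] = []) ↔
          (∃ x ∈ l :: rest, PySem.Chars.replace s (PySem.Chars.slice s (some 0) (some x)) [] = []) := by
        constructor
        · rintro ⟨x, hx, hP⟩
          exact ⟨x, List.mem_cons_of_mem _ hx, hP⟩
        · rintro ⟨x, hx, hP⟩
          rcases List.mem_cons.mp hx with rfl | hx'
          · exact absurd hP hc
          · exact ⟨x, hx', hP⟩
      exact if_congr hiff rfl rfl

-- A's existential over the range, in Nat form
theorem condA_iff (cs : List Char) :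
    (∃ l ∈ PySem.List.pyRange 1 (PySem.Int.floordiv (PySem.Chars.len cs) 2 + 1) 1,
        PySem.Chars.replace cs (PySem.Chars.slice cs (some 0) (some l)) [] = []) ↔
      ∃ m : Nat, 1 ≤ m ∧ 2 * m ≤ cs.length ∧ PySem.Chars.replace cs (cs.take m) [] = [] := by
  have hfd : PySem.Int.floordiv (PySem.Chars.len cs) 2 = (cs.length : Int) / 2 := by
    rw [PySem.Chars.len_eq, PySem.Int.floordiv_eq_ediv_of_pos (by norm_num)]
  constructor
  · rintro ⟨l, hl, hrep⟩
    rw [PySem.List.mem_pyRange_one, hfd] at hl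
    have hm : 1 ≤ l.toNat ∧ 2 * l.toNat ≤ cs.length := by omega
    refine ⟨l.toNat, hm.1, hm.2, ?_⟩
    have hs : PySem.Chars.slice cs (some 0) (some l) = cs.take l.toNat := by
      simp only [PySem.Chars.slice_eq_listSlice, PySem.List.slice_zero_start]
      exact PySem.List.slice_to cs (by omega)
    rwa [hs] at hrep
  · rintro ⟨m, hm1, hm2, hrep⟩
    refine ⟨(m : Int), ?_, ?_⟩
    · rw [PySem.List.mem_pyRange_one, hfd]
      omega
    · have hs : PySem.Chars.slice cs (some 0) (some (m : Int)) = cs.take m := by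
        simp only [PySem.Chars.slice_eq_listSlice, PySem.List.slice_zero_start]
        rw [PySem.List.slice_to cs (by positivity)]
        simp
      rwa [hs]

theorem main_iff (cs : List Char) (h : cs ≠ []) :
    (∃ l ∈ PySem.List.pyRange 1 (PySem.Int.floordiv (PySem.Chars.len cs) 2 + 1) 1,
        PySem.Chars.replace cs (PySem.Chars.slice cs (some 0) (some l)) [] = []) ↔
      PySem.Chars.isIn cs (PySem.Chars.slice (cs ++ cs) (some 1) (some (-1))) = true := by
  rw [condA_iff cs, isIn_iff_rot cs h]
  constructor
  · rintro ⟨m, hm1, hm2, hrep⟩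
    have hmne : cs.take m ≠ [] := by
      rw [Ne, List.take_eq_nil_iff]
      rintro (h0 | hnil)
      · omega
      · exact h hnil
    obtain ⟨k, hk⟩ := (replace_nil_iff cs (cs.take m) hmne).mp hrep
    have htlen : (cs.take m).length = m := by
      rw [List.length_take]; omega
    refine ⟨m, hm1, by omega, ?_⟩
    have ht := tiling_rot (cs.take m) k
    rw [htlen] at ht
    conv_lhs => rw [hk]
    rw [ht, ← hk]
  · rintro ⟨p, hp1, hp2, hrot⟩
    set g := Nat.gcd p cs.length with hg
    have hrotg : cs.rotate g = cs := rot_gcd cs p cs.length hrot (List.rotate_length cs)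
    have hgdvd : g ∣ cs.length := Nat.gcd_dvd_right p cs.length
    have hg1 : 1 ≤ g := Nat.gcd_pos_of_pos_left cs.length (by omega)
    have hgp : g ≤ p := Nat.gcd_le_left cs.length (by omega)
    obtain ⟨c, hc⟩ := hgdvd
    have hL1 : 1 ≤ cs.length := List.length_pos_of_ne_nil h
    have hc2 : 2 ≤ c := by
      rcases c with _ | c
      · rw [Nat.mul_zero] at hc; omega
      rcases c with _ | c
      · rw [Nat.mul_one] at hc; omega
      · omega
    have h2g : 2 * g ≤ cs.length := by
      have hx := Nat.mul_le_mul_left g hc2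
      omega
    refine ⟨g, hg1, h2g, ?_⟩
    have htile := rot_tiling g c cs hc hrotg
    apply (replace_nil_iff cs (cs.take g) ?_).mpr ⟨c, htile⟩
    rw [Ne, List.take_eq_nil_iff]
    rintro (h0 | hnil)
    · omega
    · exact h hnil

-- str(n) is never empty
theorem toDigitsCore_ne_nil (b : Nat) :
    ∀ (f n : Nat) (ds : List Char), Nat.toDigitsCore b (f + 1) n ds ≠ [] := by
  intro f
  induction f with
  | zero =>
    intro n ds
    rw [Nat.toDigitsCore]
    split
    · simp
    · rw [Nat.toDigitsCore]
      simp
  | succ f ih =>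
    intro n ds
    rw [Nat.toDigitsCore]
    split
    · simp
    · exact ih _ _

theorem toDigits_ne_nil (b m : Nat) : Nat.toDigits b m ≠ [] := by
  unfold Nat.toDigits
  exact toDigitsCore_ne_nil b m m []

theorem toChars_ne_nil (n : Int) : PySem.Int.toChars n ≠ [] := by
  unfold PySem.Int.toChars
  split
  · simp
  · exact toDigits_ne_nil 10 n.toNat

-- ===== VERDICT (by name: the statement is the Claim_ definition above) =====
theorem invalidityPart2_spec : Claim_equal_invalidityPart2 := by
  intro n _
  unfold Spec_invalidityPart2
  simp only [invalidityPart2, invalidityPart2_alt]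
  set cs := PySem.Int.toChars n with hcs
  have hne : cs ≠ [] := toChars_ne_nil n
  rw [loop_eq]
  rcases Classical.em (PySem.Chars.isIn cs (PySem.Chars.slice (cs ++ cs) (some 1) (some (-1))) = true) with hB | hB
  · rw [if_pos ((main_iff cs hne).mpr hB), if_pos hB]
  · rw [if_neg (fun hA => hB ((main_iff cs hne).mp hA)), if_neg hB]
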